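-- pv_equiv track=rewrite | github.com/rafamdr/coding_chanllenges | largestRect/main.py | get_largest_range_v2
-- ===== SOURCE A (Python) =====
-- def get_largest_range_v2(line):
--     curr_idx = None
--     i = col_count = curr_sum = max_sum = curr_row_count = row_count = 0
--     for i, value in enumerate(line):
--         if value > 0:
--             curr_sum += value
--             curr_row_count = min(curr_row_count or value, value)
--             curr_idx = i if curr_idx is None else curr_idx
--         else:
--             if curr_sum > max_sum and curr_idx is not None:
--                 max_sum = curr_sum
--                 col_count = i - curr_idx
--                 row_count = curr_row_count
--             curr_row_count = curr_idx = None
--             curr_sum = 0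
--     if curr_idx is not None:
--         if curr_sum > max_sum:
--             col_count = i - curr_idx + 1
--             row_count = curr_row_count
--     return row_count, col_count
-- ===== SOURCE B (Python) =====
-- def _pos_runs(line):
--     """Split line into maximal runs of consecutive positive values."""
--     runs = []
--     cur = []
--     for v in line:
--         if v > 0:
--             cur.append(v)
--         else:
--             if cur:
--                 runs.append(cur)
--             cur = []
--     if cur:
--         runs.append(cur)
--     return runs
--
--
-- def get_largest_range_v2(line):
--     best_sum = row_count = col_count = 0
--     for run in _pos_runs(line):
--         s = sum(run)
--         if s > best_sum:
--             best_sum, row_count, col_count = s, min(run), len(run)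
--     return row_count, col_count
-- ===== Notes on version B (the rewrite author's own statement) =====
-- stated objective: simpler
-- what changed: Replaces A's single fused stateful scan (Optional start index, running min with an 'or' trick, index arithmetic for run length, a duplicated end-of-list flush) by a two-phase decomposition: first split the line into maximal positive runs, then fold sum/min/len of each run into the best-so-far triple.
import Mathlib
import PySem

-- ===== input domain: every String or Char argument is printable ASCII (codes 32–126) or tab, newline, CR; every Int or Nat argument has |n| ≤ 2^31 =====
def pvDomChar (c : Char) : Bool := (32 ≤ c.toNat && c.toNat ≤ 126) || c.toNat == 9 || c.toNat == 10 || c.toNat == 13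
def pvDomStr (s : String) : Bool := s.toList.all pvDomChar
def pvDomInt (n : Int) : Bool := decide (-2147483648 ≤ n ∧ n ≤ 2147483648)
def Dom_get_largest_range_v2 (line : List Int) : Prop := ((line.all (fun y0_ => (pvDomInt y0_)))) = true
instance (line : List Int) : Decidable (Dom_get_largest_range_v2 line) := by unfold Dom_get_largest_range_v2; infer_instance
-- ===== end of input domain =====

-- B replaces A's fused stateful scan by a two-phase decomposition (split into positive runs, then
-- pick the best run by sum), for simplicity; same O(n) cost, same return value everywhere.

-- ===== PORT A =====
-- Python's curr_row_count is 0 or None or a positive int; None and 0 are used identically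
-- (both falsy in `curr_row_count or value`, never otherwise read), so `crc` models None as 0.
structure StA where
  i : Int
  curr_idx : Option Int
  col_count : Int
  curr_sum : Int
  max_sum : Int
  crc : Int
  row_count : Int
deriving Repr, DecidableEq

def stepA (s : StA) (iv : Int × Int) : StA :=
  if iv.2 > 0 then
    { s with i := iv.1,
             curr_sum := s.curr_sum + iv.2,
             crc := min (if s.crc = 0 then iv.2 else s.crc) iv.2,
             curr_idx := if s.curr_idx.isNone then some iv.1 else s.curr_idx }
  else if s.curr_sum > s.max_sum && s.curr_idx.isSome then
    { i := iv.1, curr_idx := none, col_count := iv.1 - s.curr_idx.getD 0,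
      curr_sum := 0, max_sum := s.curr_sum, crc := 0, row_count := s.crc }
  else
    { i := iv.1, curr_idx := none, col_count := s.col_count,
      curr_sum := 0, max_sum := s.max_sum, crc := 0, row_count := s.row_count }

def finishA (s : StA) : Int × Int :=
  if s.curr_idx.isSome then
    if s.curr_sum > s.max_sum then (s.crc, s.i - s.curr_idx.getD 0 + 1)
    else (s.row_count, s.col_count)
  else (s.row_count, s.col_count)

def get_largest_range_v2 (line : List Int) : Int × Int :=
  finishA ((PySem.List.enumerate line 0).foldl stepA ⟨0, none, 0, 0, 0, 0, 0⟩)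

-- ===== PORT B =====
def runsStep (rc : List (List Int) × List Int) (v : Int) : List (List Int) × List Int :=
  if v > 0 then (rc.1, rc.2 ++ [v])
  else if rc.2 ≠ [] then (rc.1 ++ [rc.2], []) else (rc.1, [])

def posRuns (line : List Int) : List (List Int) :=
  let p := line.foldl runsStep ([], [])
  if p.2 ≠ [] then p.1 ++ [p.2] else p.1

def bestStep (b : Int × Int × Int) (run : List Int) : Int × Int × Int :=
  let s := run.sum
  -- min(run): run is a nonempty positive run whenever the branch is taken, so getD is never used
  if s > b.1 then (s, (PySem.List.min? run (fun x => x)).getD 0, (run.length : Int)) else b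

def get_largest_range_v2_alt (line : List Int) : Int × Int :=
  let b := (posRuns line).foldl bestStep (0, 0, 0)
  (b.2.1, b.2.2)

-- ===== PRECONDITION & SPEC =====
def Spec_get_largest_range_v2 (line : List Int) (out : Int × Int) : Prop := out = get_largest_range_v2_alt line
instance (line : List Int) (out : Int × Int) : Decidable (Spec_get_largest_range_v2 line out) := by unfold Spec_get_largest_range_v2; infer_instance

-- ===== CLAIM (what is proved, stated in full; the proofs are below) =====
def Claim_equal_get_largest_range_v2 : Prop := ∀ (line : List Int), Dom_get_largest_range_v2 line → Spec_get_largest_range_v2 line (get_largest_range_v2 line)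

-- ===== LEMMAS AND PROOFS =====

/-- The positive runs still to be produced, given the pending partial run `cur`. -/
def runsGo : List Int → List Int → List (List Int)
  | cur, [] => if cur = [] then [] else [cur]
  | cur, v :: t =>
    if v > 0 then runsGo (cur ++ [v]) t
    else if cur = [] then runsGo [] t else cur :: runsGo [] t

lemma runs_fold (line : List Int) : ∀ (runs : List (List Int)) (cur : List Int),
    (let p := line.foldl runsStep (runs, cur);
     if p.2 ≠ [] then p.1 ++ [p.2] else p.1) = runs ++ runsGo cur line := by
  induction line with
  | nil =>
    intro runs cur
    by_cases h : cur = [] <;> simp [runsGo, h]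
  | cons v t ih =>
    intro runs cur
    by_cases hv : v > 0
    · simp only [List.foldl_cons, runsStep, hv, if_pos, runsGo]
      simpa [hv] using ih runs (cur ++ [v])
    · by_cases hc : cur = []
      · simpa [runsStep, hv, hc, runsGo] using ih runs []
      · simp only [List.foldl_cons, runsStep, hv, hc, runsGo, ite_not]
        simpa [hv, hc] using ih (runs ++ [cur]) []

lemma posRuns_eq (line : List Int) : posRuns line = runsGo [] line := by
  simpa [posRuns] using runs_fold line [] []

/-- min of a nonempty list, Python-style running fold; 0 on []. -/
def minOf : List Int → Int
  | [] => 0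
  | x :: t => t.foldl min x

lemma minOf_snoc (x : Int) (t : List Int) (v : Int) :
    minOf ((x :: t) ++ [v]) = min (minOf (x :: t)) v := by
  simp [minOf]

lemma foldl_min_pos : ∀ (t : List Int) (x : Int), 0 < x → (∀ v ∈ t, 0 < v) → 0 < t.foldl min x
  | [], _, hx, _ => hx
  | y :: t, x, hx, ht =>
    foldl_min_pos t (min x y) (lt_min hx (ht y (List.mem_cons_self)))
      (fun v hv => ht v (List.mem_cons_of_mem _ hv))

lemma minOf_pos {l : List Int} (h : ∀ v ∈ l, 0 < v) (hne : l ≠ []) : 0 < minOf l := by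
  cases l with
  | nil => exact absurd rfl hne
  | cons x t =>
    exact foldl_min_pos t x (h x (by simp)) (fun v hv => h v (by simp [hv]))

lemma min?_getD_eq_minOf (x : Int) (t : List Int) :
    (PySem.List.min? (x :: t) (fun y => y)).getD 0 = minOf (x :: t) := by
  simp [PySem.List.min?_id_cons, minOf]

/-- Main loop invariant: A's scan from a state describing pending run `cur` at position `k`
    computes the same answer as B's fold over the remaining runs. -/
lemma loopA (line : List Int) : ∀ (k : Int) (cur : List Int) (s : StA),
    (∀ v ∈ cur, 0 < v) →
    (cur = [] → s.curr_idx = none ∧ s.curr_sum = 0 ∧ s.crc = 0) →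
    (cur ≠ [] → s.curr_idx = some (k - cur.length) ∧ s.curr_sum = cur.sum ∧
                s.crc = minOf cur ∧ s.i = k - 1) →
    finishA ((PySem.List.enumerate line k).foldl stepA s)
      = (let b := (runsGo cur line).foldl bestStep (s.max_sum, s.row_count, s.col_count);
         (b.2.1, b.2.2)) := by
  induction line with
  | nil =>
    intro k cur s hpos hnil hcons
    cases cur with
    | nil =>
      obtain ⟨h1, h2, h3⟩ := hnil rfl
      simp [PySem.List.enumerate, finishA, runsGo, h1]
    | cons x t =>
      obtain ⟨h1, h2, h3, h4⟩ := hcons (by simp)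
      have hlen : k - 1 - (k - ((x :: t).length : Int)) + 1 = ((x :: t).length : Int) := by omega
      simp only [PySem.List.enumerate, List.foldl_nil, finishA, h1, Option.isSome_some,
        if_true, Option.getD_some, h2, h3, h4, runsGo,
        if_neg (by simp : ¬(x :: t) = []), List.foldl_cons, bestStep, min?_getD_eq_minOf, hlen]
      split_ifs with hgt
      · simp
      · simp
  | cons v line ih =>
    intro k cur s hpos hnil hcons
    rw [PySem.List.enumerate_cons, List.foldl_cons]
    by_cases hv : v > 0
    · -- the run is extended
      have hgo : runsGo cur (v :: line) = runsGo (cur ++ [v]) line := by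
        simp [runsGo, hv]
      rw [hgo]
      have hstep : stepA s (k, v) =
          { s with i := k,
                   curr_sum := s.curr_sum + v,
                   crc := min (if s.crc = 0 then v else s.crc) v,
                   curr_idx := if s.curr_idx.isNone then some k else s.curr_idx } := by
        simp [stepA, hv]
      rw [hstep]
      apply ih (k + 1) (cur ++ [v])
      · intro w hw
        rcases List.mem_append.mp hw with h | h
        · exact hpos w h
        · simp at h; omega
      · intro h; simp at h
      · intro _
        cases cur with
        | nil =>
          obtain ⟨h1, h2, h3⟩ := hnil rfl
          refine ⟨by simp [h1], by simp [h2], by simp [h3, minOf], by simp⟩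
        | cons x t =>
          obtain ⟨h1, h2, h3, h4⟩ := hcons (by simp)
          have hcrc : s.crc ≠ 0 := by
            have := minOf_pos hpos (by simp)
            omega
          refine ⟨?_, ?_, ?_, by simp⟩
          · rw [h1]
            simp only [Option.isNone_some, Bool.false_eq_true, if_false]
            have : k - ((x :: t).length : Int) = k + 1 - (((x :: t) ++ [v]).length : Int) := by
              simp only [List.length_append, List.length_cons, List.length_nil]
              push_cast
              omega
            rw [this]
          · rw [h2]
            simp only [List.sum_append, List.sum_cons, List.sum_nil]
            ring
          · rw [if_neg hcrc, h3, minOf_snoc]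
    · -- the run (if any) ends here
      cases cur with
      | nil =>
        obtain ⟨h1, h2, h3⟩ := hnil rfl
        have hstep : stepA s (k, v) =
            { i := k, curr_idx := none, col_count := s.col_count,
              curr_sum := 0, max_sum := s.max_sum, crc := 0, row_count := s.row_count } := by
          simp [stepA, hv, h1, h2]
        rw [hstep]
        have hgo : runsGo [] (v :: line) = runsGo [] line := by
          simp [runsGo, hv]
        rw [hgo]
        exact ih (k + 1) [] _ (by simp) (fun _ => ⟨rfl, rfl, rfl⟩) (by simp)
      | cons x t =>
        obtain ⟨h1, h2, h3, h4⟩ := hcons (by simp)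
        have hgo : runsGo (x :: t) (v :: line) = (x :: t) :: runsGo [] line := by
          simp [runsGo, hv]
        rw [hgo, List.foldl_cons]
        by_cases hgt : (x :: t).sum > s.max_sum
        · have hstep : stepA s (k, v) = (StA.mk k none ((x :: t).length : Int) 0 ((x :: t).sum) 0 (minOf (x :: t))) := by
            simp only [List.sum_cons] at hgt
            have hcond : (s.curr_sum > s.max_sum && s.curr_idx.isSome) = true := by
              rw [h1, h2]; simp [hgt]
            simp only [stepA, if_neg hv, if_pos hcond]
            simp [h1, h2, h3]
          have hbest : bestStep (s.max_sum, s.row_count, s.col_count) (x :: t)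
              = ((x :: t).sum, minOf (x :: t), ((x :: t).length : Int)) := by
            simp only [bestStep, min?_getD_eq_minOf]
            simp only [List.sum_cons] at hgt
            simp [hgt]
          rw [hstep, hbest]
          exact ih (k + 1) [] _ (by simp) (fun _ => ⟨rfl, rfl, rfl⟩) (by simp)
        · have hstep : stepA s (k, v) =
              (StA.mk k none s.col_count 0 s.max_sum 0 s.row_count) := by
            simp only [List.sum_cons] at hgt
            have hcond : ¬ ((s.curr_sum > s.max_sum && s.curr_idx.isSome) = true) := by
              rw [h2]; simp [hgt]
            simp only [stepA, if_neg hv, if_neg hcond]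
          have hbest : bestStep (s.max_sum, s.row_count, s.col_count) (x :: t)
              = (s.max_sum, s.row_count, s.col_count) := by
            simp only [List.sum_cons] at hgt
            simp [bestStep, hgt]
          rw [hstep, hbest]
          exact ih (k + 1) [] _ (by simp) (fun _ => ⟨rfl, rfl, rfl⟩) (by simp)

-- ===== VERDICT (by name: the statement is the Claim_ definition above) =====
theorem get_largest_range_v2_spec : Claim_equal_get_largest_range_v2 := by
  intro line _
  unfold Spec_get_largest_range_v2 get_largest_range_v2 get_largest_range_v2_alt
  rw [posRuns_eq]
  exact loopA line 0 [] ⟨0, none, 0, 0, 0, 0, 0⟩ (by simp) (fun _ => ⟨rfl, rfl, rfl⟩) (by simp)
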